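-- pv_equiv track=rewrite | github.com/alexshoe/advent-of-code | 2022/day-14/solution.py | generate_scan
-- ===== SOURCE A (Python) =====
-- def generate_scan(rocks, x_range, y_max):
--     scan = [[" " for _ in range(x_range[1] + 1)] for _ in range(y_max)]
--     for y in range(y_max):
--         for x in range(x_range[1] + 1):
--             if (x + x_range[0], y) in rocks:
--                 scan[y][x] = "#"
--             else:
--                 scan[y][x] = "."
--     return scan
-- ===== SOURCE B (Python) =====
-- def generate_scan(rocks, x_range, y_max):
--     # Pre-fill with "." and stamp only the rocks that fall inside the window:
--     # one pass over rocks instead of a per-cell membership scan.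
--     scan = [["."] * (x_range[1] + 1) for _ in range(y_max)]
--     for gx, gy in rocks:
--         col = gx - x_range[0]
--         if 0 <= gy < y_max and 0 <= col <= x_range[1]:
--             scan[gy][col] = "#"
--     return scan
-- ===== Notes on version B (the rewrite author's own statement) =====
-- stated objective: faster
-- what changed: B pre-fills the grid with '.' and makes one sparse pass over the rock set, stamping '#' only at in-window rocks, instead of A's dense per-cell membership scan over every (x, y) of the grid.
import Mathlib
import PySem

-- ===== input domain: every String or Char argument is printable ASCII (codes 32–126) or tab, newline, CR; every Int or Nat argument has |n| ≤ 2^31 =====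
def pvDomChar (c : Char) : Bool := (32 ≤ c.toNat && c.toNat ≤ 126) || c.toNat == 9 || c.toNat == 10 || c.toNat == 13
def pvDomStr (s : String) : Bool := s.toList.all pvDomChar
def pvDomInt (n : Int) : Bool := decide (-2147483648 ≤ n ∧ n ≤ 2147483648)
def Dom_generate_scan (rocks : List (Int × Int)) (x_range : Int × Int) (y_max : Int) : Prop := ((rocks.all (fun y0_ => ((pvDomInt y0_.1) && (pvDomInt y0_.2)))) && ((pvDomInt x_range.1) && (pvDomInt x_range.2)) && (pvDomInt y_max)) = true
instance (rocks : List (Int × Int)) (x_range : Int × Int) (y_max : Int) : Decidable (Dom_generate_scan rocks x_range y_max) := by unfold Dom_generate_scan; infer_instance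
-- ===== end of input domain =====

-- B pre-fills the grid with "." and stamps "#" in one pass over the rock set instead of
-- A's per-cell membership scan; same return value on every input.

-- ===== PORT A =====
-- Literal port of A: dense per-cell scan. The indices y and x come from range(...) so they
-- are ≥ 0 and .toNat is exact here.
def generate_scan (rocks : List (Int × Int)) (x_range : Int × Int) (y_max : Int) : List (List String) :=
  let scan := (PySem.List.pyRange 0 y_max).map (fun _ =>
    (PySem.List.pyRange 0 (x_range.2 + 1)).map (fun _ => " "))
  (PySem.List.pyRange 0 y_max).foldl (fun scan y =>
    (PySem.List.pyRange 0 (x_range.2 + 1)).foldl (fun scan x =>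
      if (x + x_range.1, y) ∈ rocks then
        scan.modify y.toNat (fun row => row.set x.toNat "#")
      else
        scan.modify y.toNat (fun row => row.set x.toNat ".")) scan) scan

-- ===== PORT B =====
-- Port of B: grid pre-filled with ".", then one stamping pass over rocks; the guard makes
-- both indices nonnegative and in range, so .toNat is exact here.
def generate_scan_alt (rocks : List (Int × Int)) (x_range : Int × Int) (y_max : Int) : List (List String) :=
  let scan := (PySem.List.pyRange 0 y_max).map (fun _ => PySem.List.pyRepeat ["."] (x_range.2 + 1))
  rocks.foldl (fun scan r =>
    let col := r.1 - x_range.1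
    if 0 ≤ r.2 ∧ r.2 < y_max ∧ 0 ≤ col ∧ col ≤ x_range.2 then
      scan.modify r.2.toNat (fun row => row.set col.toNat "#")
    else scan) scan

-- ===== PRECONDITION & SPEC =====
def Spec_generate_scan (rocks : List (Int × Int)) (x_range : Int × Int) (y_max : Int) (out : List (List String)) : Prop := out = generate_scan_alt rocks x_range y_max
instance (rocks : List (Int × Int)) (x_range : Int × Int) (y_max : Int) (out : List (List String)) : Decidable (Spec_generate_scan rocks x_range y_max out) := by unfold Spec_generate_scan; infer_instance

-- ===== CLAIM (what is proved, stated in full; the proofs are below) =====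
def Claim_equal_generate_scan : Prop := ∀ (rocks : List (Int × Int)) (x_range : Int × Int) (y_max : Int), Dom_generate_scan rocks x_range y_max → Spec_generate_scan rocks x_range y_max (generate_scan rocks x_range y_max)

-- ===== LEMMAS AND PROOFS =====

theorem pyRange_zero_toNat (m : Int) :
    PySem.List.pyRange 0 m = (List.range m.toNat).map Int.ofNat := by
  have h : (if 0 < m then m.toNat else 0) = m.toNat := by split <;> omega
  simp only [PySem.List.pyRange]
  simp [h]

-- total cell access: row y of a grid (default []), cell x of a row (default "")
def pvRow (g : List (List String)) (y : Nat) : List String := g.getD y []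
def pvCell (g : List (List String)) (y x : Nat) : String := (pvRow g y).getD x ""

theorem pvRow_modify_set (g : List (List String)) (i j : Nat) (v : String) (y : Nat) :
    pvRow (g.modify i (fun r => r.set j v)) y
      = if y = i then (pvRow g y).set j v else pvRow g y := by
  unfold pvRow
  by_cases hy : y < g.length
  · rw [List.getD_eq_getElem _ _ (by rw [List.length_modify]; exact hy),
      List.getD_eq_getElem _ _ hy, List.getElem_modify]
    split <;> split <;> simp_all
  · rw [List.getD_eq_default _ _ (by rw [List.length_modify]; exact Nat.le_of_not_lt hy),
      List.getD_eq_default _ _ (Nat.le_of_not_lt hy)]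
    split <;> simp

theorem pvCell_getD_set (r : List String) (j : Nat) (v : String) (x : Nat) :
    (r.set j v).getD x "" = if x = j ∧ x < r.length then v else r.getD x "" := by
  by_cases hx : x < r.length
  · rw [List.getD_eq_getElem _ _ (by rw [List.length_set]; exact hx),
      List.getD_eq_getElem _ _ hx, List.getElem_set]
    split <;> split <;> first | rfl | (exfalso; omega)
  · rw [List.getD_eq_default _ _ (by rw [List.length_set]; exact Nat.le_of_not_lt hx),
      List.getD_eq_default _ _ (Nat.le_of_not_lt hx)]
    simp; omega

theorem pv_grid_ext (g₁ g₂ : List (List String)) (hl : g₁.length = g₂.length)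
    (hrow : ∀ y, y < g₁.length → (pvRow g₁ y).length = (pvRow g₂ y).length)
    (hcell : ∀ y x, y < g₁.length → x < (pvRow g₁ y).length → pvCell g₁ y x = pvCell g₂ y x) :
    g₁ = g₂ := by
  apply List.ext_getElem hl
  intro y hy1 hy2
  have hR1 : pvRow g₁ y = g₁[y] := by rw [pvRow, List.getD_eq_getElem _ _ hy1]
  have hR2 : pvRow g₂ y = g₂[y] := by rw [pvRow, List.getD_eq_getElem _ _ hy2]
  have hrow' := hrow y hy1
  rw [hR1, hR2] at hrow'
  apply List.ext_getElem hrow'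
  intro x hx1 hx2
  have hc := hcell y x hy1 (by rw [hR1]; exact hx1)
  simp only [pvCell] at hc
  rw [hR1, hR2, List.getD_eq_getElem _ _ hx1, List.getD_eq_getElem _ _ hx2] at hc
  exact hc

theorem pvRowLen_modify_set (g : List (List String)) (i j : Nat) (v : String) (y : Nat) :
    (pvRow (g.modify i (fun r => r.set j v)) y).length = (pvRow g y).length := by
  rw [pvRow_modify_set]; split <;> simp

theorem pvRow_map_range (f : Nat → List String) (Y y : Nat) (hy : y < Y) :
    pvRow ((List.range Y).map f) y = f y := by
  rw [pvRow, List.getD_eq_getElem _ _ (by simpa using hy)]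
  simp

-- ---- A's nested fold, characterised cell by cell ----

theorem A_inner_length (v : Nat → String) (y₀ : Nat) (xs : List Nat) (g : List (List String)) :
    (xs.foldl (fun g x' => g.modify y₀ (fun r => r.set x' (v x'))) g).length = g.length := by
  induction xs generalizing g with
  | nil => rfl
  | cons x' xs ih => rw [List.foldl_cons, ih]; simp

theorem A_inner_rowlen (v : Nat → String) (y₀ : Nat) (xs : List Nat) (g : List (List String)) (y : Nat) :
    (pvRow (xs.foldl (fun g x' => g.modify y₀ (fun r => r.set x' (v x'))) g) y).length
      = (pvRow g y).length := by
  induction xs generalizing g with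
  | nil => rfl
  | cons x' xs ih =>
    rw [List.foldl_cons, ih, pvRow_modify_set]
    split <;> simp

theorem A_inner_cells (v : Nat → String) (y₀ : Nat) (xs : List Nat) (g : List (List String)) (y x : Nat) :
    pvCell (xs.foldl (fun g x' => g.modify y₀ (fun r => r.set x' (v x'))) g) y x
      = if y = y₀ ∧ x ∈ xs ∧ x < (pvRow g y).length then v x else pvCell g y x := by
  induction xs generalizing g with
  | nil => simp
  | cons x' xs ih =>
    rw [List.foldl_cons, ih, pvRowLen_modify_set]
    have hstep : pvCell (g.modify y₀ (fun r => r.set x' (v x'))) y x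
        = if y = y₀ ∧ x = x' ∧ x < (pvRow g y).length then v x' else pvCell g y x := by
      unfold pvCell
      rw [pvRow_modify_set]
      by_cases h : y = y₀
      · simp only [h, if_true]
        rw [pvCell_getD_set]
        simp
      · simp [h]
    rw [hstep]
    by_cases h1 : y = y₀ <;> by_cases h2 : x ∈ xs <;> by_cases h3 : x = x' <;>
      by_cases h4 : x < (pvRow g y).length <;> simp_all

theorem A_outer_cells (v : Nat → Nat → String) (xs ys : List Nat) (g : List (List String)) (y x : Nat) :
    pvCell (ys.foldl (fun g y₀ => xs.foldl (fun g x' => g.modify y₀ (fun r => r.set x' (v y₀ x'))) g) g) y x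
      = if y ∈ ys ∧ x ∈ xs ∧ x < (pvRow g y).length then v y x else pvCell g y x := by
  induction ys generalizing g with
  | nil => simp
  | cons y' ys ih =>
    rw [List.foldl_cons, ih, A_inner_rowlen, A_inner_cells]
    by_cases h1 : y ∈ ys <;> by_cases h2 : x ∈ xs <;> by_cases h3 : y = y' <;>
      by_cases h4 : x < (pvRow g y).length <;> simp_all

theorem A_outer_length (v : Nat → Nat → String) (xs ys : List Nat) (g : List (List String)) :
    (ys.foldl (fun g y₀ => xs.foldl (fun g x' => g.modify y₀ (fun r => r.set x' (v y₀ x'))) g) g).length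
      = g.length := by
  induction ys generalizing g with
  | nil => rfl
  | cons y' ys ih => rw [List.foldl_cons, ih, A_inner_length]

theorem A_outer_rowlen (v : Nat → Nat → String) (xs ys : List Nat) (g : List (List String)) (y : Nat) :
    (pvRow (ys.foldl (fun g y₀ => xs.foldl (fun g x' => g.modify y₀ (fun r => r.set x' (v y₀ x'))) g) g) y).length
      = (pvRow g y).length := by
  induction ys generalizing g with
  | nil => rfl
  | cons y' ys ih => rw [List.foldl_cons, ih, A_inner_rowlen]

-- ---- B's stamping fold, characterised cell by cell ----

theorem pvRowLen_ite_modify_set (c : Prop) [Decidable c] (g : List (List String)) (i j : Nat)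
    (v : String) (y : Nat) :
    (pvRow (if c then g.modify i (fun r => r.set j v) else g) y).length = (pvRow g y).length := by
  split
  · exact pvRowLen_modify_set g i j v y
  · rfl

theorem B_length (x0 x1 ymax : Int) (rs : List (Int × Int)) (g : List (List String)) :
    (rs.foldl (fun scan r => if 0 ≤ r.2 ∧ r.2 < ymax ∧ 0 ≤ r.1 - x0 ∧ r.1 - x0 ≤ x1 then
        scan.modify r.2.toNat (fun row => row.set (r.1 - x0).toNat "#") else scan) g).length
      = g.length := by
  induction rs generalizing g with
  | nil => rfl
  | cons r rs ih => rw [List.foldl_cons, ih]; split <;> simp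

theorem B_rowlen (x0 x1 ymax : Int) (rs : List (Int × Int)) (g : List (List String)) (y : Nat) :
    (pvRow (rs.foldl (fun scan r => if 0 ≤ r.2 ∧ r.2 < ymax ∧ 0 ≤ r.1 - x0 ∧ r.1 - x0 ≤ x1 then
        scan.modify r.2.toNat (fun row => row.set (r.1 - x0).toNat "#") else scan) g) y).length
      = (pvRow g y).length := by
  induction rs generalizing g with
  | nil => rfl
  | cons r rs ih =>
    rw [List.foldl_cons, ih]
    split
    · rw [pvRow_modify_set]; split <;> simp
    · rfl

theorem B_cells (x0 x1 ymax : Int) (rs : List (Int × Int)) (g : List (List String)) (y x : Nat) :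
    pvCell (rs.foldl (fun scan r => if 0 ≤ r.2 ∧ r.2 < ymax ∧ 0 ≤ r.1 - x0 ∧ r.1 - x0 ≤ x1 then
        scan.modify r.2.toNat (fun row => row.set (r.1 - x0).toNat "#") else scan) g) y x
      = if (∃ r ∈ rs, (0 ≤ r.2 ∧ r.2 < ymax ∧ 0 ≤ r.1 - x0 ∧ r.1 - x0 ≤ x1) ∧ r.2.toNat = y ∧ (r.1 - x0).toNat = x)
            ∧ x < (pvRow g y).length
        then "#" else pvCell g y x := by
  induction rs generalizing g with
  | nil => simp
  | cons r rs ih =>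
    rw [List.foldl_cons, ih, pvRowLen_ite_modify_set]
    have hstep : pvCell (if 0 ≤ r.2 ∧ r.2 < ymax ∧ 0 ≤ r.1 - x0 ∧ r.1 - x0 ≤ x1 then
          g.modify r.2.toNat (fun row => row.set (r.1 - x0).toNat "#") else g) y x
        = if (0 ≤ r.2 ∧ r.2 < ymax ∧ 0 ≤ r.1 - x0 ∧ r.1 - x0 ≤ x1) ∧ r.2.toNat = y ∧ (r.1 - x0).toNat = x
              ∧ x < (pvRow g y).length
          then "#" else pvCell g y x := by
      split
      · next hg =>
        unfold pvCell
        rw [pvRow_modify_set]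
        by_cases h : y = r.2.toNat
        · simp only [h, if_true]
          rw [pvCell_getD_set]
          have hx0 : x0 ≤ r.1 := by omega
          simp [hg, eq_comm, hx0]
        · simp only [if_neg h]
          split <;> simp_all
      · next hg =>
        have hno : ¬((0 ≤ r.2 ∧ r.2 < ymax ∧ 0 ≤ r.1 - x0 ∧ r.1 - x0 ≤ x1) ∧ r.2.toNat = y
            ∧ (r.1 - x0).toNat = x ∧ x < (pvRow g y).length) := fun hc => hg hc.1
        rw [if_neg hno]
    rw [hstep]
    clear ih
    simp only [List.exists_mem_cons_iff]
    by_cases hE : ∃ s ∈ rs, (0 ≤ s.2 ∧ s.2 < ymax ∧ 0 ≤ s.1 - x0 ∧ s.1 - x0 ≤ x1) ∧ s.2.toNat = y ∧ (s.1 - x0).toNat = x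
    · by_cases hL : x < (pvRow g y).length
      · rw [if_pos ⟨hE, hL⟩, if_pos ⟨Or.inr hE, hL⟩]
      · rw [if_neg (fun hc => hL hc.2), if_neg (fun hc => hL hc.2.2.2),
            if_neg (fun hc => hL hc.2)]
    · by_cases hP : (0 ≤ r.2 ∧ r.2 < ymax ∧ 0 ≤ r.1 - x0 ∧ r.1 - x0 ≤ x1) ∧ r.2.toNat = y ∧ (r.1 - x0).toNat = x
      · by_cases hL : x < (pvRow g y).length
        · rw [if_neg (fun hc => hE hc.1), if_pos ⟨hP.1, hP.2.1, hP.2.2, hL⟩,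
              if_pos ⟨Or.inl hP, hL⟩]
        · rw [if_neg (fun hc => hL hc.2), if_neg (fun hc => hL hc.2.2.2),
              if_neg (fun hc => hL hc.2)]
      · by_cases hL : x < (pvRow g y).length
        · rw [if_neg (fun hc => hE hc.1), if_neg (fun hc => hP ⟨hc.1, hc.2.1, hc.2.2.1⟩),
              if_neg (fun hc => hc.1.elim (fun hp => hP hp) hE)]
        · rw [if_neg (fun hc => hL hc.2), if_neg (fun hc => hL hc.2.2.2),
              if_neg (fun hc => hL hc.2)]

-- ---- initial grids and the membership condition ----

theorem pv_cond_iff (rocks : List (Int × Int)) (x0 x1 ymax : Int) (y x : Nat)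
    (hy : y < ymax.toNat) (hx : x < (x1 + 1).toNat) :
    (∃ s ∈ rocks, (0 ≤ s.2 ∧ s.2 < ymax ∧ 0 ≤ s.1 - x0 ∧ s.1 - x0 ≤ x1)
        ∧ s.2.toNat = y ∧ (s.1 - x0).toNat = x)
      ↔ ((x : Int) + x0, (y : Int)) ∈ rocks := by
  constructor
  · rintro ⟨⟨gx, gy⟩, hmem, ⟨h1, h2, h3, h4⟩, h5, h6⟩
    have e1 : gy = (y : Int) := by omega
    have e2 : gx = (x : Int) + x0 := by omega
    rw [e1, e2] at hmem
    exact hmem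
  · intro hmem
    exact ⟨((x : Int) + x0, (y : Int)), hmem,
      ⟨by omega, by omega, by omega, by omega⟩, by omega, by omega⟩

theorem pv_A_norm (rocks : List (Int × Int)) (x0 x1 y_max : Int) :
    generate_scan rocks (x0, x1) y_max
      = (List.range y_max.toNat).foldl (fun g y =>
          (List.range (x1 + 1).toNat).foldl (fun g x =>
            g.modify y (fun r => r.set x
              (if ((x : Int) + x0, (y : Int)) ∈ rocks then "#" else "."))) g)
          ((List.range y_max.toNat).map (fun _ => (List.range (x1 + 1).toNat).map (fun _ => " "))) := by
  unfold generate_scan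
  simp only [pyRange_zero_toNat, List.map_map]
  rw [List.foldl_map]
  apply PySem.List.foldl_congr_mem
  intro acc y _
  rw [List.foldl_map]
  apply PySem.List.foldl_congr_mem
  intro acc' x _
  simp only [Int.ofNat_eq_natCast, Int.toNat_natCast]
  split <;> rfl

theorem pv_B_norm (rocks : List (Int × Int)) (x0 x1 y_max : Int) :
    generate_scan_alt rocks (x0, x1) y_max
      = rocks.foldl (fun scan r =>
          if 0 ≤ r.2 ∧ r.2 < y_max ∧ 0 ≤ r.1 - x0 ∧ r.1 - x0 ≤ x1 then
            scan.modify r.2.toNat (fun row => row.set (r.1 - x0).toNat "#")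
          else scan)
          ((List.range y_max.toNat).map (fun _ => List.replicate (x1 + 1).toNat ".")) := by
  unfold generate_scan_alt
  simp only [pyRange_zero_toNat, List.map_map, PySem.List.pyRepeat_singleton]
  rfl

-- ===== VERDICT (by name: the statement is the Claim_ definition above) =====
theorem generate_scan_spec : Claim_equal_generate_scan := by
  unfold Claim_equal_generate_scan
  intro rocks x_range y_max _
  unfold Spec_generate_scan
  obtain ⟨x0, x1⟩ := x_range
  rw [pv_A_norm, pv_B_norm]
  have hWA : ∀ y, y < y_max.toNat →
      (pvRow ((List.range y_max.toNat).map (fun _ => (List.range (x1 + 1).toNat).map (fun _ => " "))) y).length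
        = (x1 + 1).toNat := by
    intro y hy
    rw [pvRow_map_range _ _ _ hy]
    simp
  have hWB : ∀ y, y < y_max.toNat →
      (pvRow ((List.range y_max.toNat).map (fun _ => List.replicate (x1 + 1).toNat ".")) y).length
        = (x1 + 1).toNat := by
    intro y hy
    rw [pvRow_map_range _ _ _ hy]
    simp
  have hlenA : ((List.range y_max.toNat).foldl (fun g y =>
      (List.range (x1 + 1).toNat).foldl (fun g x =>
        g.modify y (fun r => r.set x
          (if ((x : Int) + x0, (y : Int)) ∈ rocks then "#" else "."))) g)
      ((List.range y_max.toNat).map (fun _ => (List.range (x1 + 1).toNat).map (fun _ => " ")))).length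
      = y_max.toNat := by
    rw [A_outer_length]
    simp
  apply pv_grid_ext
  · rw [hlenA, B_length]
    simp
  · intro y hy
    rw [hlenA] at hy
    rw [A_outer_rowlen, B_rowlen, hWA y hy, hWB y hy]
  · intro y x hy hx
    rw [hlenA] at hy
    rw [A_outer_rowlen, hWA y hy] at hx
    rw [A_outer_cells, B_cells]
    have hA3 : y ∈ List.range y_max.toNat ∧ x ∈ List.range (x1 + 1).toNat ∧
        x < (pvRow ((List.range y_max.toNat).map (fun _ =>
          (List.range (x1 + 1).toNat).map (fun _ => " "))) y).length :=
      ⟨List.mem_range.mpr hy, List.mem_range.mpr hx, by rw [hWA y hy]; exact hx⟩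
    rw [if_pos hA3]
    by_cases hc : ((x : Int) + x0, (y : Int)) ∈ rocks
    · have hB3 : (∃ s ∈ rocks, (0 ≤ s.2 ∧ s.2 < y_max ∧ 0 ≤ s.1 - x0 ∧ s.1 - x0 ≤ x1)
            ∧ s.2.toNat = y ∧ (s.1 - x0).toNat = x)
          ∧ x < (pvRow ((List.range y_max.toNat).map (fun _ =>
              List.replicate (x1 + 1).toNat ".")) y).length :=
        ⟨(pv_cond_iff rocks x0 x1 y_max y x hy hx).mpr hc, by rw [hWB y hy]; exact hx⟩
      rw [if_pos hB3, if_pos hc]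
    · have hB3 : ¬((∃ s ∈ rocks, (0 ≤ s.2 ∧ s.2 < y_max ∧ 0 ≤ s.1 - x0 ∧ s.1 - x0 ≤ x1)
            ∧ s.2.toNat = y ∧ (s.1 - x0).toNat = x)
          ∧ x < (pvRow ((List.range y_max.toNat).map (fun _ =>
              List.replicate (x1 + 1).toNat ".")) y).length) :=
        fun h => hc ((pv_cond_iff rocks x0 x1 y_max y x hy hx).mp h.1)
      rw [if_neg hB3, if_neg hc]
      unfold pvCell
      rw [pvRow_map_range _ _ _ hy]
      rw [List.getD_eq_getElem _ _ (by simpa using hx)]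
      simp
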